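-- pv_equiv track=rewrite | github.com/nokuthabam/Model-Finetuning | wav2vec2/scripts/subgroup_split.py | split_by_age_and_gender
-- ===== SOURCE A (Python) =====
-- def age_group_def(age):
--     """
--     Classify age into groups.
--     """
--     if age is None:
--         return "unknown"
--
--     age = str(age).strip().lower()
--
--     # Handle common non-numeric cases
--     if age in {"nan", "not available", "unknown", "", "-1"}:
--         return "unknown"
--
--     # Handle decades like "70s"
--     if age.endswith("s") and age[:-1].isdigit():
--         age = int(age[:-1])
--     else:
--         try:
--             age = int(age)
--         except ValueError:
--             return "unknown"
--     if age <= 0: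
--         return "unknown"
--     elif age <= 18:
--         return "18_below"
--     elif age < 30:
--         return "19_29"
--     elif age < 40:
--         return "30_39"
--     elif age < 50:
--         return "40_49"
--     else:
--         return "50_plus"
--
-- def split_by_age_and_gender(entries):
--     age_groups = {}
--     gender_groups = {}
--     for entry in entries:
--         age = entry.get("age")
--         gender = str(entry.get("gender", "unknown")).lower()
--         age_group = age_group_def(age)
--
--         age_groups.setdefault(age_group, []).append(entry)
--         gender_groups.setdefault(gender, []).append(entry)
--
--     return age_groups, gender_groups
-- ===== SOURCE B (Python) =====
-- import bisect
--
-- _NON_NUMERIC = {"nan", "not available", "unknown", "", "-1"}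
-- _BOUNDS = [0, 18, 29, 39, 49]
-- _LABELS = ["unknown", "18_below", "19_29", "30_39", "40_49", "50_plus"]
--
--
-- def _parse_age(age):
--     """Return the numeric age, or None when it cannot be classified."""
--     if age is None:
--         return None
--     s = str(age).strip().lower()
--     if s in _NON_NUMERIC:
--         return None
--     if s.endswith("s") and s[:-1].isdigit():
--         return int(s[:-1])
--     try:
--         return int(s)
--     except ValueError:
--         return None
--
--
-- def _age_label(age):
--     n = _parse_age(age)
--     if n is None:
--         return "unknown"
--     return _LABELS[bisect.bisect_left(_BOUNDS, n)]
--
--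
-- def _group_by(entries, label):
--     groups = {}
--     for entry in entries:
--         groups.setdefault(label(entry), []).append(entry)
--     return groups
--
--
-- def split_by_age_and_gender(entries):
--     return (_group_by(entries, lambda e: _age_label(e.get("age"))),
--             _group_by(entries, lambda e: str(e.get("gender", "unknown")).lower()))
-- ===== Notes on version B (the rewrite author's own statement) =====
-- stated objective: idiomatic
-- what changed: The sequential if/elif age ladder is replaced by a fixed sorted boundary table indexed with bisect_left, and the single loop maintaining two dicts is split into a generic _group_by helper applied twice (once per key function).
import Mathlib
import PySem

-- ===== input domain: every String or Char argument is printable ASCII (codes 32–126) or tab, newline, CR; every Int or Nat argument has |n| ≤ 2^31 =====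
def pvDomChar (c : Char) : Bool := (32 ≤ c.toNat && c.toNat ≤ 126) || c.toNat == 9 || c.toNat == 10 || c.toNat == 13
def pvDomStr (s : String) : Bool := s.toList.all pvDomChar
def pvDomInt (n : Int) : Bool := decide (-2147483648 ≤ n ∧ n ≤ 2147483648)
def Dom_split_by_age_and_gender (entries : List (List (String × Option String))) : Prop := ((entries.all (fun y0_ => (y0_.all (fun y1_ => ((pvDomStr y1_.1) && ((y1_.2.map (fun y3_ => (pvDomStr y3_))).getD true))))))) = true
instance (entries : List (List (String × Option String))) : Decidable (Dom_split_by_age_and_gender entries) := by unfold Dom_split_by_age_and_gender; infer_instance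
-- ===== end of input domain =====

-- B: table-driven bisect lookup + a generic grouping pass applied twice, instead of A's if/elif ladder inside one two-dict loop (idiomatic restructuring; same cost).
-- ===== PORT A =====
-- B reuses A's string-parsing preamble verbatim (the hint's suggestion); the shared
-- parse step is factored out here and used by BOTH ports.
-- Python: str(age).strip().lower(), the non-numeric set, the "70s" decade form, int(); None = unclassifiable.
def pvParseAge (age : Option String) : Option Int :=
  match age with
  | none => none
  | some a =>
    let s := PySem.Str.lower (PySem.Str.strip a)
    if s = "nan" ∨ s = "not available" ∨ s = "unknown" ∨ s = "" ∨ s = "-1" then none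
    else if PySem.Str.endswith s "s" && PySem.Str.strIsdigit (PySem.Str.slice s none (some (-1))) then
      PySem.Int.ofStr? (PySem.Str.slice s none (some (-1)))   -- int cannot fail here: s[:-1] is all digits
    else
      PySem.Int.ofStr? s                                      -- none = ValueError -> "unknown"

-- A's classification: the sequential if/elif ladder.
def age_group_def (age : Option String) : String :=
  match pvParseAge age with
  | none => "unknown"
  | some n =>
    if n ≤ 0 then "unknown"
    else if n ≤ 18 then "18_below"
    else if n < 30 then "19_29"
    else if n < 40 then "30_39"
    else if n < 50 then "40_49"
    else "50_plus"

-- entry.get("gender", "unknown") with str(...): a stored None prints as "None".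
def pvGenderLabel (d : PySem.Dict String (Option String)) : String :=
  PySem.Str.lower (match d.getD "gender" (some "unknown") with
    | some g => g
    | none => "None")

-- groups.setdefault(k, []).append(entry)  ==  groups[k] = groups.get(k, []) + [entry]
def pvAppendAt (d : PySem.Dict String (List (List (String × Option String))))
    (k : String) (e : List (String × Option String)) :
    PySem.Dict String (List (List (String × Option String))) :=
  d.modify k [] (· ++ [e])

-- A: one loop maintaining both dicts.
def split_by_age_and_gender (entries : List (List (String × Option String))) : (List (String × List (List (String × Option String)))) × (List (String × List (List (String × Option String)))) :=
  let st := entries.foldl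
    (fun st entry =>
      let d := PySem.Dict.ofList entry
      let age := d.getD "age" none
      let gender := pvGenderLabel d
      let ageGroup := age_group_def age
      (pvAppendAt st.1 ageGroup entry, pvAppendAt st.2 gender entry))
    (PySem.Dict.empty, PySem.Dict.empty)
  (st.1.items, st.2.items)

-- ===== PORT B =====
def pvBounds : List Int := [0, 18, 29, 39, 49]
def pvLabels : List String := ["unknown", "18_below", "19_29", "30_39", "40_49", "50_plus"]

-- B's classification: table lookup via bisect_left instead of the ladder.
def pvAgeLabel (age : Option String) : String :=
  match pvParseAge age with
  | none => "unknown"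
  | some n => pvLabels.getD (PySem.List.bisectLeft pvBounds n) "unknown"
    -- _LABELS[bisect.bisect_left(_BOUNDS, n)]; the index is always < 6, getD is the safe subscript

-- B's generic single-dict grouping pass.
def pvGroupBy (entries : List (List (String × Option String)))
    (label : List (String × Option String) → String) :
    PySem.Dict String (List (List (String × Option String))) :=
  entries.foldl (fun groups entry => (groups.modify (label entry) [] (· ++ [entry]))) PySem.Dict.empty

-- B: two independent grouping passes.
def split_by_age_and_gender_alt (entries : List (List (String × Option String))) : (List (String × List (List (String × Option String)))) × (List (String × List (List (String × Option String)))) :=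
  ((pvGroupBy entries (fun e => pvAgeLabel ((PySem.Dict.ofList e).getD "age" none))).items,
   (pvGroupBy entries (fun e => pvGenderLabel (PySem.Dict.ofList e))).items)
-- ===== PRECONDITION & SPEC =====
def Spec_split_by_age_and_gender (entries : List (List (String × Option String))) (out : (List (String × List (List (String × Option String)))) × (List (String × List (List (String × Option String))))) : Prop := out = split_by_age_and_gender_alt entries
instance (entries : List (List (String × Option String))) (out : (List (String × List (List (String × Option String)))) × (List (String × List (List (String × Option String))))) : Decidable (Spec_split_by_age_and_gender entries out) := by unfold Spec_split_by_age_and_gender; exact instDecidableEqProd _ _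

-- ===== CLAIM (what is proved, stated in full; the proofs are below) =====
def Claim_equal_split_by_age_and_gender : Prop := ∀ (entries : List (List (String × Option String))), Dom_split_by_age_and_gender entries → Spec_split_by_age_and_gender entries (split_by_age_and_gender entries)

-- ===== LEMMAS AND PROOFS =====

-- bisect_left on the boundary table picks exactly the ladder's bucket index.
theorem bisect_eq_ladder (n : Int) :
    PySem.List.bisectLeft pvBounds n =
      (if n ≤ 0 then 0 else if n ≤ 18 then 1 else if n < 30 then 2
       else if n < 40 then 3 else if n < 50 then 4 else 5) := by
  obtain ⟨h1, h2, h3⟩ := PySem.List.bisectLeft_spec pvBounds n (by decide)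
  set k := PySem.List.bisectLeft pvBounds n with hk
  have hlen : pvBounds.length = 5 := by decide
  rw [hlen] at h1
  have l0 : 0 < k → (0:Int) < n := fun h => by
    have := h2 0 (by decide) h; norm_num [pvBounds] at this; omega
  have l1 : 1 < k → (18:Int) < n := fun h => by
    have := h2 1 (by decide) h; norm_num [pvBounds] at this; omega
  have l2 : 2 < k → (29:Int) < n := fun h => by
    have := h2 2 (by decide) h; norm_num [pvBounds] at this; omega
  have l3 : 3 < k → (39:Int) < n := fun h => by
    have := h2 3 (by decide) h; norm_num [pvBounds] at this; omega
  have l4 : 4 < k → (49:Int) < n := fun h => by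
    have := h2 4 (by decide) h; norm_num [pvBounds] at this; omega
  have u0 : k ≤ 0 → n ≤ 0 := fun h => by
    have := h3 0 (by decide) h; norm_num [pvBounds] at this; omega
  have u1 : k ≤ 1 → n ≤ 18 := fun h => by
    have := h3 1 (by decide) h; norm_num [pvBounds] at this; omega
  have u2 : k ≤ 2 → n ≤ 29 := fun h => by
    have := h3 2 (by decide) h; norm_num [pvBounds] at this; omega
  have u3 : k ≤ 3 → n ≤ 39 := fun h => by
    have := h3 3 (by decide) h; norm_num [pvBounds] at this; omega
  have u4 : k ≤ 4 → n ≤ 49 := fun h => by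
    have := h3 4 (by decide) h; norm_num [pvBounds] at this; omega
  split_ifs <;> omega

-- The ladder and the bisect table classify every age identically.
theorem age_label_eq (age : Option String) : age_group_def age = pvAgeLabel age := by
  unfold age_group_def pvAgeLabel
  cases pvParseAge age with
  | none => rfl
  | some n =>
    simp only
    rw [bisect_eq_ladder]
    split_ifs <;> rfl

-- ===== VERDICT (by name: the statement is the Claim_ definition above) =====
theorem split_by_age_and_gender_spec : Claim_equal_split_by_age_and_gender := by
  intro entries _
  show _ = _
  simp only [split_by_age_and_gender, split_by_age_and_gender_alt, pvGroupBy, pvAppendAt]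
  rw [PySem.List.foldl_prod_mk
    (fun s e => (PySem.Dict.modify s (age_group_def ((PySem.Dict.ofList e).getD "age" none)) [] (· ++ [e])))
    (fun s e => (PySem.Dict.modify s (pvGenderLabel (PySem.Dict.ofList e)) [] (· ++ [e])))]
  simp only [age_label_eq]
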